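-- pv_equiv track=rewrite | github.com/godjw/TextRank | todo.py | get_token_pairs
-- ===== SOURCE A (Python) =====
-- def get_token_pairs(window_size, sentences):
--     token_pairs = []
--     for sentence in sentences:
--         for i, word in enumerate(sentence):
--             for j in range(i + 1, i + window_size + 1):
--                 if j >= len(sentence):
--                     break
--                 pair = (word, sentence[j])
--                 if pair not in token_pairs:
--                     token_pairs.append(pair)
--     return token_pairs
-- ===== SOURCE B (Python) =====
-- def get_token_pairs(window_size, sentences):
--     # Suffix walk: pair each head word with the next window_size words via slicing,
--     # recording first occurrences in an insertion-ordered dict (no index arithmetic,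
--     # no break, no linear membership scan of the result).
--     seen = {}
--     w = max(0, window_size)
--     for sentence in sentences:
--         rest = list(sentence)
--         while rest:
--             head = rest[0]
--             rest = rest[1:]
--             for other in rest[:w]:
--                 seen[(head, other)] = None
--     return list(seen)
-- ===== Notes on version B (the rewrite author's own statement) =====
-- stated objective: faster
-- what changed: B replaces A's index/range nest with a suffix walk that slices the next window_size words off each tail, and replaces A's linear membership scan of the growing result with an insertion-ordered dict of first occurrences, returning its keys.
import Mathlib
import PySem

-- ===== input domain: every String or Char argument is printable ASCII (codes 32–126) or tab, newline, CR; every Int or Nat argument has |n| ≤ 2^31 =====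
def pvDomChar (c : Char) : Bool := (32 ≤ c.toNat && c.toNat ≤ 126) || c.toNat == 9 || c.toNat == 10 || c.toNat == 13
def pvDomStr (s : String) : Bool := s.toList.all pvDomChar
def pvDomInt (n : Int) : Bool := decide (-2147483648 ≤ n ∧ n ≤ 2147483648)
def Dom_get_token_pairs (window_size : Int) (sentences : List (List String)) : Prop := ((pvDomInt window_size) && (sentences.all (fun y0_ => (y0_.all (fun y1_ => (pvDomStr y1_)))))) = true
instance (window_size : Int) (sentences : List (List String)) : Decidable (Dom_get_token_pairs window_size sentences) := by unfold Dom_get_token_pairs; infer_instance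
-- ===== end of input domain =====

-- B walks each sentence by suffixes (slicing, no indices, no break) and records first
-- occurrences in an insertion-ordered dict instead of scanning the result list; measured faster.

-- ===== PORT A =====
-- inner 'for j in range(i+1, i+window_size+1): if j >= len(sentence): break; …' loop as a counter
-- recursion (Python's range is lazy, so the loop is a j-counter bounded by b; break = stop recursion)
def pvInnerA (word : String) (sentence : List String) (j b : Int) (acc : List (String × String)) :
    List (String × String) :=
  if _h : j < b then
    if (sentence.length : Int) ≤ j then acc  -- break
    else
      -- sentence[j]: j is always in range here, so pyGetD with unused default is exact
      let pair := (word, PySem.List.pyGetD sentence j "")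
      pvInnerA word sentence (j + 1) b (if pair ∈ acc then acc else acc ++ [pair])
  else acc
termination_by (b - j).toNat
decreasing_by omega

def get_token_pairs (window_size : Int) (sentences : List (List String)) : List (String × String) :=
  sentences.foldl (fun token_pairs sentence =>
    (PySem.List.enumerate sentence).foldl (fun token_pairs iw =>
      pvInnerA iw.2 sentence (iw.1 + 1) (iw.1 + window_size + 1) token_pairs)
      token_pairs) []

-- ===== PORT B =====
-- 'while rest: head = rest[0]; rest = rest[1:]; for other in rest[:w]: seen[(head, other)] = None'
def pvScanSuffix (w : Int) (rest : List String) (seen : PySem.Dict (String × String) Unit) :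
    PySem.Dict (String × String) Unit :=
  match rest with
  | [] => seen
  | head :: rest' =>
    pvScanSuffix w rest'
      ((PySem.List.slice rest' none (some w)).foldl
        (fun d other => d.insert (head, other) ()) seen)

def get_token_pairs_alt (window_size : Int) (sentences : List (List String)) : List (String × String) :=
  let w := max 0 window_size
  (sentences.foldl (fun seen sentence => pvScanSuffix w sentence seen) PySem.Dict.empty).keys

-- ===== PRECONDITION & SPEC =====
def Spec_get_token_pairs (window_size : Int) (sentences : List (List String)) (out : List (String × String)) : Prop := out = get_token_pairs_alt window_size sentences
instance (window_size : Int) (sentences : List (List String)) (out : List (String × String)) : Decidable (Spec_get_token_pairs window_size sentences out) := by unfold Spec_get_token_pairs; infer_instance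

-- ===== CLAIM (what is proved, stated in full; the proofs are below) =====
def Claim_equal_get_token_pairs : Prop := ∀ (window_size : Int) (sentences : List (List String)), Dom_get_token_pairs window_size sentences → Spec_get_token_pairs window_size sentences (get_token_pairs window_size sentences)

-- ===== LEMMAS AND PROOFS =====

-- 'append if absent' step, the common dedup shape both sides reduce to
def pvIns (acc : List (String × String)) (p : String × String) : List (String × String) :=
  if p ∈ acc then acc else acc ++ [p]

-- the ordered pair stream both programs deduplicate: head paired with the next w words, per suffix
def pvPairs (w : Nat) : List String → List (String × String)
  | [] => []
  | h :: t => (t.take w).map (fun x => (h, x)) ++ pvPairs w t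

theorem pvFoldl_flatMap {α β : Type} (g : α → List β) (f : List β → β → List β)
    (l : List α) (acc : List β) :
    l.foldl (fun a x => (g x).foldl f a) acc = (l.flatMap g).foldl f acc := by
  induction l generalizing acc with
  | nil => rfl
  | cons x xs ih => simp [List.flatMap_cons, List.foldl_append, ih]

theorem pvFoldl_congr {α β : Type} (f g : β → α → β) (l : List α) (acc : β)
    (h : ∀ b a, a ∈ l → f b a = g b a) : l.foldl f acc = l.foldl g acc := by
  induction l generalizing acc with
  | nil => rfl
  | cons x xs ih => simp only [List.foldl_cons, h acc x (by simp)]; exact ih _ (fun b a ha => h b a (by simp [ha]))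

-- ---------- A side: the literal port is 'foldl pvIns' over the pair stream ----------

theorem pvInnerA_eq_foldl (word : String) (sentence : List String) :
    ∀ (n : ℕ) (j b : Int), (b - j).toNat = n → ∀ (acc : List (String × String)),
    pvInnerA word sentence j b acc =
      ((PySem.List.pyRange j (min b (sentence.length : Int)) 1).map
        (fun k => (word, PySem.List.pyGetD sentence k ""))).foldl pvIns acc := by
  intro n
  induction n with
  | zero =>
    intro j b hn acc
    rw [pvInnerA, PySem.List.pyRange_one_eq_nil (le_trans (min_le_left b _) (by omega))]
    simp [show ¬ j < b by omega]
  | succ n ih =>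
    intro j b hn acc
    by_cases hjb : j < b
    · by_cases hL : (sentence.length : Int) ≤ j
      · rw [pvInnerA, PySem.List.pyRange_one_eq_nil (le_trans (min_le_right b _) hL)]
        simp [hjb, hL]
      · have hcons : PySem.List.pyRange j (min b (sentence.length : Int)) 1 =
            j :: PySem.List.pyRange (j + 1) (min b (sentence.length : Int)) 1 :=
          PySem.List.pyRange_one_cons (lt_min hjb (lt_of_not_ge hL))
        rw [pvInnerA, hcons]
        simp only [hjb, hL, dif_pos, List.map_cons, List.foldl_cons]
        rw [ih (j + 1) b (by omega)]
        rfl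
    · rw [pvInnerA, PySem.List.pyRange_one_eq_nil (le_trans (min_le_left b _) (by omega))]
      simp [hjb]

-- the in-range index map is a take-of-drop segment
theorem pvMapGet (xs : List String) (word : String) (a b : Int)
    (ha : 0 ≤ a) (hb : b ≤ (xs.length : Int)) :
    (PySem.List.pyRange a b 1).map (fun j => (word, PySem.List.pyGetD xs j "")) =
      ((xs.drop a.toNat).take (b - a).toNat).map (fun x => (word, x)) := by
  rw [PySem.List.pyRange_one, List.map_map]
  refine List.ext_getElem ?_ ?_
  · simp; omega
  · intro i h1 h2
    simp only [List.getElem_map, Function.comp_apply, List.getElem_range,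
      List.getElem_take, List.getElem_drop]
    have hi : i < (b - a).toNat := by simpa using h1
    rw [PySem.List.pyGetD_eq_getElem xs "" (by omega) (by omega)]
    congr 2
    omega

-- per sentence, A's enumerate/range nest generates exactly pvPairs (suffix-shaped)
theorem pvA_sentence (ws : Int) (full : List String) :
    ∀ (t : List String) (s : ℕ), full.drop s = t →
    (PySem.List.enumerate t (s : Int)).flatMap (fun iw =>
        (PySem.List.pyRange (iw.1 + 1) (min (iw.1 + ws + 1) (full.length : Int)) 1).map
          (fun j => (iw.2, PySem.List.pyGetD full j ""))) =
      pvPairs (max 0 ws).toNat t := by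
  intro t
  induction t with
  | nil => intro s _; simp [PySem.List.enumerate_nil, pvPairs]
  | cons h t' ih =>
    intro s hdrop
    have hlen : t'.length + 1 = full.length - s ∧ s < full.length := by
      have := congrArg List.length hdrop
      simp at this
      omega
    have hdrop' : full.drop (s + 1) = t' := by
      have h1 : List.drop 1 (full.drop s) = full.drop (s + 1) := by
        rw [List.drop_drop]
      rw [hdrop] at h1
      simpa using h1.symm
    rw [PySem.List.enumerate_cons, List.flatMap_cons]
    have hseg := pvMapGet full h ((s : Int) + 1) (min ((s : Int) + ws + 1) (full.length : Int))
      (by omega) (min_le_right _ _)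
    simp only [hseg]
    have htoNat : ((s : Int) + 1).toNat = s + 1 := by omega
    rw [htoNat, hdrop']
    have htake : t'.take ((min ((s : Int) + ws + 1) (full.length : Int)) - ((s : Int) + 1)).toNat
        = t'.take (max 0 ws).toNat := by
      rw [List.take_eq_take_iff]
      omega
    rw [htake]
    have hih := ih (s + 1) hdrop'
    push_cast at hih
    rw [hih, pvPairs]

-- ---------- B side: dict insertion keeps keys dedup-ordered ----------

theorem pvKeys_foldl_insert (ps : List (String × String)) :
    ∀ (d : PySem.Dict (String × String) Unit),
    (ps.foldl (fun d p => d.insert p ()) d).keys = ps.foldl pvIns d.keys := by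
  induction ps with
  | nil => intro d; rfl
  | cons p ps ih =>
    intro d
    rw [List.foldl_cons, List.foldl_cons, ih]
    congr 1
    by_cases hc : d.contains p = true
    · rw [PySem.Dict.keys_insert_of_contains d () hc, pvIns,
        if_pos ((PySem.Dict.contains_iff_mem_keys d p).mp hc)]
    · rw [PySem.Dict.keys_insert_of_not_contains d ()
        (by simpa using hc), pvIns,
        if_neg (fun hm => hc ((PySem.Dict.contains_iff_mem_keys d p).mpr hm))]

theorem pvScanSuffix_keys (w : Int) (hw : 0 ≤ w) :
    ∀ (rest : List String) (seen : PySem.Dict (String × String) Unit),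
    (pvScanSuffix w rest seen).keys = (pvPairs w.toNat rest).foldl pvIns seen.keys := by
  intro rest
  induction rest with
  | nil => intro seen; rfl
  | cons head rest' ih =>
    intro seen
    rw [pvScanSuffix, ih, PySem.List.slice_to rest' hw,
      show (List.foldl (fun d other => d.insert (head, other) ()) seen (rest'.take w.toNat)) =
        List.foldl (fun d p => d.insert p ()) seen ((rest'.take w.toNat).map (fun x => (head, x)))
        from by rw [List.foldl_map],
      pvKeys_foldl_insert, pvPairs, List.foldl_append]

theorem pvB_keys (w : Int) (hw : 0 ≤ w) (sentences : List (List String)) :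
    ∀ (seen : PySem.Dict (String × String) Unit),
    (sentences.foldl (fun seen sentence => pvScanSuffix w sentence seen) seen).keys =
      (sentences.flatMap (pvPairs w.toNat)).foldl pvIns seen.keys := by
  induction sentences with
  | nil => intro seen; rfl
  | cons s ss ih =>
    intro seen
    rw [List.foldl_cons, ih, pvScanSuffix_keys w hw, List.flatMap_cons, List.foldl_append]

-- ===== VERDICT (by name: the statement is the Claim_ definition above) =====
theorem get_token_pairs_spec : Claim_equal_get_token_pairs := by
  intro window_size sentences _
  unfold Spec_get_token_pairs get_token_pairs get_token_pairs_alt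
  rw [pvB_keys (max 0 window_size) (le_max_left 0 window_size) sentences PySem.Dict.empty,
    PySem.Dict.keys_empty]
  rw [← pvFoldl_flatMap]
  refine pvFoldl_congr _ _ _ _ (fun tp sentence _ => ?_)
  have hA : (PySem.List.enumerate sentence).foldl (fun token_pairs iw =>
      pvInnerA iw.2 sentence (iw.1 + 1) (iw.1 + window_size + 1) token_pairs) tp =
      ((PySem.List.enumerate sentence).flatMap (fun iw =>
        (PySem.List.pyRange (iw.1 + 1) (min (iw.1 + window_size + 1) (sentence.length : Int) : Int) 1).map
          (fun j => (iw.2, PySem.List.pyGetD sentence j "")))).foldl pvIns tp := by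
    rw [← pvFoldl_flatMap]
    refine pvFoldl_congr _ _ _ _ (fun tp' iw _ => ?_)
    rw [pvInnerA_eq_foldl iw.2 sentence _ (iw.1 + 1) (iw.1 + window_size + 1) rfl, List.foldl_map]
  have hsent := pvA_sentence window_size sentence sentence 0 (by simp)
  simp only [Nat.cast_zero] at hsent
  rw [hA, hsent]
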